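-- pv_equiv track=rewrite | github.com/Aarogaming/Workbench | scripts/check_workflow_concurrency.py | check_workflow_content
-- ===== SOURCE A (Python) =====
-- REQUIRED_GROUP = (
--     "group: ${{ github.workflow }}-${{ github.event.pull_request.number || github.ref }}"
-- )
--
-- REQUIRED_CANCEL = "cancel-in-progress: true"
--
-- def check_workflow_content(content: str, workflow_label: str) -> list[str]:
--     issues: list[str] = []
--     lines = content.splitlines()
--     stripped = [line.strip() for line in lines]
--
--     concurrency_idx = next((idx for idx, line in enumerate(stripped) if line == "concurrency:"), None)
--     jobs_idx = next((idx for idx, line in enumerate(stripped) if line == "jobs:"), None)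
--
--     if concurrency_idx is None:
--         return [f"{workflow_label}: missing top-level concurrency block"]
--
--     if jobs_idx is not None and concurrency_idx > jobs_idx:
--         issues.append(f"{workflow_label}: concurrency block must be defined before jobs")
--
--     search_end = jobs_idx if jobs_idx is not None else len(stripped)
--     concurrency_region = stripped[concurrency_idx:search_end]
--
--     if REQUIRED_GROUP not in concurrency_region:
--         issues.append(
--             f"{workflow_label}: missing branch-aware concurrency group '{REQUIRED_GROUP}'"
--         )
--     if REQUIRED_CANCEL not in concurrency_region:
--         issues.append(
--             f"{workflow_label}: missing deterministic cancellation policy '{REQUIRED_CANCEL}'"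
--         )
--     return issues
-- ===== SOURCE B (Python) =====
-- REQUIRED_GROUP = (
--     "group: ${{ github.workflow }}-${{ github.event.pull_request.number || github.ref }}"
-- )
--
-- REQUIRED_CANCEL = "cancel-in-progress: true"
--
-- def check_workflow_content(content: str, workflow_label: str) -> list[str]:
--     c_idx = None
--     j_idx = None
--     group_seen = False
--     cancel_seen = False
--     for idx, raw in enumerate(content.splitlines()):
--         line = raw.strip()
--         if line == "concurrency:" and c_idx is None:
--             c_idx = idx
--         if line == "jobs:" and j_idx is None:
--             j_idx = idx
--         in_region = c_idx is not None and j_idx is None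
--         if in_region and line == REQUIRED_GROUP:
--             group_seen = True
--         if in_region and line == REQUIRED_CANCEL:
--             cancel_seen = True
--     if c_idx is None:
--         return [f"{workflow_label}: missing top-level concurrency block"]
--     issues: list[str] = []
--     if j_idx is not None and c_idx > j_idx:
--         issues.append(f"{workflow_label}: concurrency block must be defined before jobs")
--     if not group_seen:
--         issues.append(
--             f"{workflow_label}: missing branch-aware concurrency group '{REQUIRED_GROUP}'"
--         )
--     if not cancel_seen:
--         issues.append(
--             f"{workflow_label}: missing deterministic cancellation policy '{REQUIRED_CANCEL}'"
--         )
--     return issues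
-- ===== Notes on version B (the rewrite author's own statement) =====
-- stated objective: alternative
-- what changed: Replaced the four separate scans (two next() index searches, a slice, and two list-membership tests) with one loop over the lines that records the first indices and accumulates the group/cancel flags while inside the concurrency region.
import Mathlib
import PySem

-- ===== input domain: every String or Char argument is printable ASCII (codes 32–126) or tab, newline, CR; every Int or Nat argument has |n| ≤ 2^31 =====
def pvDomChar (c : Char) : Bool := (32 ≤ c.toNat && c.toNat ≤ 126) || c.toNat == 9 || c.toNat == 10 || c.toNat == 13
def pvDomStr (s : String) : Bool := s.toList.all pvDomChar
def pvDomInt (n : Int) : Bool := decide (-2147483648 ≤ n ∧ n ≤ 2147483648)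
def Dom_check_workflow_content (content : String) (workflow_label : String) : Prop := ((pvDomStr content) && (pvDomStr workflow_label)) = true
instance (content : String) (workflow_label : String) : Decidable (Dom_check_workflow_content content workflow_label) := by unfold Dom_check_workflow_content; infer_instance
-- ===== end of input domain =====

-- B replaces A's four separate scans (two next() searches, a slice, two membership tests)
-- with a single loop that records both first indices and the region flags in one pass (objective: alternative).

def REQUIRED_GROUP : String :=
  "group: ${{ github.workflow }}-${{ github.event.pull_request.number || github.ref }}"

def REQUIRED_CANCEL : String := "cancel-in-progress: true"

-- ===== PORT A =====
def check_workflow_content (content : String) (workflow_label : String) : List String :=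
  let lines := PySem.Str.splitlines content
  let stripped := lines.map PySem.Str.strip
  let concurrency_idx : Option Int :=
    ((PySem.List.enumerate stripped 0).find? (fun p => p.2 == "concurrency:")).map (·.1)
  let jobs_idx : Option Int :=
    ((PySem.List.enumerate stripped 0).find? (fun p => p.2 == "jobs:")).map (·.1)
  match concurrency_idx with
  | none => [workflow_label ++ ": missing top-level concurrency block"]
  | some ci =>
    let issues : List String := []
    let issues :=
      match jobs_idx with
      | some ji =>
        if ci > ji then issues ++ [workflow_label ++ ": concurrency block must be defined before jobs"]
        else issues
      | none => issues
    let search_end : Int := match jobs_idx with | some ji => ji | none => (stripped.length : Int)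
    let region := PySem.List.slice stripped (some ci) (some search_end)
    let issues :=
      if REQUIRED_GROUP ∈ region then issues
      else issues ++ [workflow_label ++ ": missing branch-aware concurrency group '" ++ REQUIRED_GROUP ++ "'"]
    let issues :=
      if REQUIRED_CANCEL ∈ region then issues
      else issues ++ [workflow_label ++ ": missing deterministic cancellation policy '" ++ REQUIRED_CANCEL ++ "'"]
    issues

-- ===== PORT B =====
-- the single for-loop of Source B: index counter, first-occurrence indices, region flags
def scanB : Nat → Option Nat → Option Nat → Bool → Bool → List String → Option Nat × Option Nat × Bool × Bool
  | _, cI, jI, g, k, [] => (cI, jI, g, k)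
  | idx, cI, jI, g, k, raw :: rest =>
    let line := PySem.Str.strip raw
    let cI' := if line == "concurrency:" && cI.isNone then some idx else cI
    let jI' := if line == "jobs:" && jI.isNone then some idx else jI
    let inRegion := cI'.isSome && jI'.isNone
    scanB (idx + 1) cI' jI' (g || (inRegion && line == REQUIRED_GROUP))
      (k || (inRegion && line == REQUIRED_CANCEL)) rest

def check_workflow_content_alt (content : String) (workflow_label : String) : List String :=
  match scanB 0 none none false false (PySem.Str.splitlines content) with
  | (cI, jI, group_seen, cancel_seen) =>
    match cI with
    | none => [workflow_label ++ ": missing top-level concurrency block"]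
    | some ci =>
      let issues : List String := []
      let issues :=
        match jI with
        | some ji =>
          if ci > ji then issues ++ [workflow_label ++ ": concurrency block must be defined before jobs"]
          else issues
        | none => issues
      let issues :=
        if group_seen then issues
        else issues ++ [workflow_label ++ ": missing branch-aware concurrency group '" ++ REQUIRED_GROUP ++ "'"]
      let issues :=
        if cancel_seen then issues
        else issues ++ [workflow_label ++ ": missing deterministic cancellation policy '" ++ REQUIRED_CANCEL ++ "'"]
      issues

-- ===== PRECONDITION & SPEC =====
def Spec_check_workflow_content (content : String) (workflow_label : String) (out : List String) : Prop := out = check_workflow_content_alt content workflow_label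
instance (content : String) (workflow_label : String) (out : List String) : Decidable (Spec_check_workflow_content content workflow_label out) := by unfold Spec_check_workflow_content; infer_instance

-- ===== CLAIM (what is proved, stated in full; the proofs are below) =====
def Claim_equal_check_workflow_content : Prop := ∀ (content : String) (workflow_label : String), Dom_check_workflow_content content workflow_label → Spec_check_workflow_content content workflow_label (check_workflow_content content workflow_label)

-- ===== LEMMAS AND PROOFS =====

def pC : String → Bool := fun r => PySem.Str.strip r == "concurrency:"
def pJ : String → Bool := fun r => PySem.Str.strip r == "jobs:"

/-- index where the region ends: first "jobs:" line, or the length -/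
def Jn (ls : List String) : Nat := (ls.findIdx? pJ).getD ls.length

/-- region when the scan is already past the first "concurrency:" line -/
def Reg1 (ls : List String) : List String := (ls.map PySem.Str.strip).take (Jn ls)

/-- the concurrency region of A, phrased over the raw line list -/
def Reg0 (ls : List String) : List String :=
  match ls.findIdx? pC with
  | none => []
  | some ci => ((ls.map PySem.Str.strip).drop ci).take (Jn ls - ci)

theorem findEnum (l : List String) (s : Int) (key : String) :
    ((PySem.List.enumerate l s).find? (fun p => p.2 == key)).map (·.1)
      = (l.findIdx? (fun x => x == key)).map (fun n : Nat => s + (n : Int)) := by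
  induction l generalizing s with
  | nil => simp [PySem.List.enumerate]
  | cons x xs ih =>
    rw [PySem.List.enumerate_cons, List.find?_cons, List.findIdx?_cons]
    cases hq : x == key with
    | true => simp [hq]
    | false =>
      simp only [hq, if_false, cond_false]
      rw [ih]
      cases xs.findIdx? (fun x => x == key) <;> simp <;> ring

theorem scanB_L2 (ls : List String) : ∀ (idx : Nat) (cI : Option Nat) (j : Nat) (g k : Bool),
    scanB idx cI (some j) g k ls
      = (cI.or ((ls.findIdx? pC).map (· + idx)), some j, g, k) := by
  induction ls with
  | nil => intro idx cI j g k; cases cI <;> simp [scanB]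
  | cons r t ih =>
    intro idx cI j g k
    simp only [scanB, List.findIdx?_cons]
    cases cI with
    | some c => cases hc : pC r <;> simp [pC] at hc <;> simp [hc, ih, Option.or] <;>
        cases t.findIdx? pC <;> simp [Option.or]
    | none =>
      cases hc : pC r with
      | true => simp [pC] at hc; simp [hc, ih, Option.or]
      | false =>
        simp [pC] at hc; simp [hc, ih, Option.or]
        cases t.findIdx? pC <;> simp [Option.or, Nat.add_assoc, Nat.add_comm 1 idx]

theorem scanB_L1 (ls : List String) : ∀ (idx : Nat) (c0 : Nat) (g k : Bool),
    scanB idx (some c0) none g k ls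
      = (some c0, (ls.findIdx? pJ).map (· + idx),
         g || decide (REQUIRED_GROUP ∈ Reg1 ls), k || decide (REQUIRED_CANCEL ∈ Reg1 ls)) := by
  induction ls with
  | nil => intro idx c0 g k; simp [scanB, Reg1]
  | cons r t ih =>
    intro idx c0 g k
    simp only [scanB, List.findIdx?_cons]
    cases hj : pJ r with
    | true =>
      simp [pJ] at hj
      have hR : Reg1 (r :: t) = [] := by simp [Reg1, Jn, List.findIdx?_cons, pJ, hj]
      simp [hj, hR, scanB_L2, Option.or]
    | false =>
      have hJn : Jn (r :: t) = Jn t + 1 := by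
        simp only [Jn, List.findIdx?_cons, pJ] at *
        simp only [hj, cond_false]
        cases t.findIdx? pJ <;> simp
      have hR : Reg1 (r :: t) = PySem.Str.strip r :: Reg1 t := by
        simp [Reg1, hJn, List.take_succ_cons]
      simp only [pJ] at hj
      have hGr : (PySem.Str.strip r == REQUIRED_GROUP) = decide (REQUIRED_GROUP = PySem.Str.strip r) := by
        by_cases h : PySem.Str.strip r = REQUIRED_GROUP <;> simp [h, Ne.symm]
      have hKr : (PySem.Str.strip r == REQUIRED_CANCEL) = decide (REQUIRED_CANCEL = PySem.Str.strip r) := by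
        by_cases h : PySem.Str.strip r = REQUIRED_CANCEL <;> simp [h, Ne.symm]
      simp [hj, ih, hR, Bool.or_assoc, hGr, hKr]
      cases t.findIdx? pJ <;> simp [Nat.add_comm 1 idx, Nat.add_assoc]

theorem scanB_L0 (ls : List String) : ∀ (idx : Nat),
    scanB idx none none false false ls
      = ((ls.findIdx? pC).map (· + idx), (ls.findIdx? pJ).map (· + idx),
         decide (REQUIRED_GROUP ∈ Reg0 ls), decide (REQUIRED_CANCEL ∈ Reg0 ls)) := by
  induction ls with
  | nil => intro idx; simp [scanB, Reg0]
  | cons r t ih =>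
    intro idx
    simp only [scanB, List.findIdx?_cons]
    cases hc : pC r with
    | true =>
      have hc' : PySem.Str.strip r = "concurrency:" := by simpa [pC] using hc
      have hj : pJ r = false := by simp [pJ, hc']
      have hJn : Jn (r :: t) = Jn t + 1 := by
        simp only [Jn, List.findIdx?_cons, pJ] at *
        simp only [hj, cond_false]
        cases t.findIdx? pJ <;> simp
      have hR : Reg0 (r :: t) = "concurrency:" :: Reg1 t := by
        simp only [Reg0, Reg1, List.findIdx?_cons, pC, hc', hJn]
        simp [hc']
      simp only [pC] at hc
      simp only [pJ] at hj
      simp [hc, hj, hc', scanB_L1, hR, List.findIdx?_cons, pJ]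
      cases t.findIdx? pJ <;> simp [Nat.add_comm 1 idx, Nat.add_assoc, REQUIRED_GROUP, REQUIRED_CANCEL]
    | false =>
      cases hj : pJ r with
      | true =>
        have hj' : PySem.Str.strip r = "jobs:" := by simpa [pJ] using hj
        have hR : Reg0 (r :: t) = [] := by
          simp only [Reg0, List.findIdx?_cons, pC, hj']
          simp only [Jn, List.findIdx?_cons, pJ, hj']
          simp
          cases t.findIdx? pC <;> simp
        simp only [pC] at hc
        simp only [pJ] at hj
        simp [hc, hj, scanB_L2, hR, Option.or]
        cases t.findIdx? pC <;> simp [Nat.add_comm 1 idx, Nat.add_assoc]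
      | false =>
        have hJn : Jn (r :: t) = Jn t + 1 := by
          simp only [Jn, List.findIdx?_cons, pJ] at *
          simp only [hj, cond_false]
          cases t.findIdx? pJ <;> simp
        have hR : Reg0 (r :: t) = Reg0 t := by
          simp only [Reg0, List.findIdx?_cons, pC] at *
          simp only [hc, cond_false]
          cases t.findIdx? pC <;> simp [hJn]
        simp only [pC] at hc
        simp only [pJ] at hj
        simp [hc, hj, ih, hR]
        constructor <;> cases t.findIdx? pC <;> cases t.findIdx? pJ <;>
          simp [Nat.add_comm 1 idx, Nat.add_assoc]

-- ===== VERDICT (by name: the statement is the Claim_ definition above) =====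
theorem check_workflow_content_spec : Claim_equal_check_workflow_content := by
  intro content workflow_label _
  show check_workflow_content content workflow_label = check_workflow_content_alt content workflow_label
  simp only [check_workflow_content, check_workflow_content_alt]
  generalize PySem.Str.splitlines content = ls
  rw [scanB_L0]
  have hcf : ((ls.map PySem.Str.strip).findIdx? (fun s => s == "concurrency:")) = ls.findIdx? pC := by
    rw [List.findIdx?_map]; rfl
  have hjf : ((ls.map PySem.Str.strip).findIdx? (fun s => s == "jobs:")) = ls.findIdx? pJ := by
    rw [List.findIdx?_map]; rfl
  rw [findEnum _ _ "concurrency:", findEnum _ _ "jobs:", hcf, hjf]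
  simp only [zero_add, Nat.add_zero]
  cases hC : ls.findIdx? pC with
  | none => simp
  | some ci =>
    simp only [Option.map_some, Option.map_id_fun, id]
    cases hJ : ls.findIdx? pJ with
    | none =>
      have hR : Reg0 ls = ((ls.map PySem.Str.strip).drop ci).take (ls.length - ci) := by
        simp [Reg0, hC, Jn, hJ]
      simp only [Option.map_none]
      rw [show ((ls.map PySem.Str.strip).length : Int) = ((ls.length : Nat) : Int) by simp]
      rw [PySem.List.slice_natCast, ← hR]
      simp
    | some ji =>
      have hR : Reg0 ls = ((ls.map PySem.Str.strip).drop ci).take (ji - ci) := by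
        simp [Reg0, hC, Jn, hJ]
      simp only [Option.map_some]
      rw [PySem.List.slice_natCast, ← hR]
      have hlt : ((ci:Int) > (ji:Int)) ↔ (ci > ji) := by exact_mod_cast Iff.rfl
      by_cases h : ci > ji
      · simp only [if_pos (hlt.mpr h), if_pos h]; simp
      · simp only [if_neg (fun hh => h (hlt.mp hh)), if_neg h]; simp
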